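-- pv_equiv track=rewrite | github.com/HannesHipp/UniCrawler | IliasCrawler/Datapoints/FilesAndVideos.py | tuple_list_to_value
-- ===== SOURCE A (Python) =====
-- def tuple_list_to_value(tupleList):
--     result = {
--         'files': [],
--         'videos': []
--     }
--     for tuple in tupleList:
--         if tuple[0] == 'file':
--             result['files'].append(tuple[1])
--         elif tuple[0] == 'video':
--             result['videos'].append(tuple[1])
--     return result
-- ===== SOURCE B (Python) =====
-- def tuple_list_to_value(tupleList):
--     # Divide and conquer: split the list in halves, recursively classify each
--     # half, and concatenate the per-category results (order is preserved).
--     def go(ts):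
--         if len(ts) <= 1:
--             if not ts:
--                 return [], []
--             k, v = ts[0]
--             if k == 'file':
--                 return [v], []
--             if k == 'video':
--                 return [], [v]
--             return [], []
--         mid = len(ts) // 2
--         lf, lv = go(ts[:mid])
--         rf, rv = go(ts[mid:])
--         return lf + rf, lv + rv
--     fs, vs = go(tupleList)
--     return {'files': fs, 'videos': vs}
-- ===== Notes on version B (the rewrite author's own statement) =====
-- stated objective: alternative
-- what changed: Replaces A's single interleaved loop mutating a pre-built dict with a divide-and-conquer recursion that splits the list in halves, classifies each half recursively, and concatenates the per-category lists.
import Mathlib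
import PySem

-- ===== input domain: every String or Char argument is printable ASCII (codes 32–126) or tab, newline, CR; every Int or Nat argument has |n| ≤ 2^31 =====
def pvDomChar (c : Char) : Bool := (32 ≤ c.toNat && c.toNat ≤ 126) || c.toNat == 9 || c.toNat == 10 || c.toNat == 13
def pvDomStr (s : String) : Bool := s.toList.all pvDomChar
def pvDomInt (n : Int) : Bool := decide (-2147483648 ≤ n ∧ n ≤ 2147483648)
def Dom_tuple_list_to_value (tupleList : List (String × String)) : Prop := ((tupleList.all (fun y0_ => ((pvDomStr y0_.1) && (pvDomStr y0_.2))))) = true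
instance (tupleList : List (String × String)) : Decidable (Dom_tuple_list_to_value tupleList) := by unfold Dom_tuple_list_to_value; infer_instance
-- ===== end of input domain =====

-- B replaces A's single interleaved dict-mutating loop with a divide-and-conquer recursion
-- (split in halves, classify each half, concatenate per category); objective: alternative.


-- ===== PORT A =====
def tuple_list_to_value (tupleList : List (String × String)) : List (String × List String) :=
  let result : PySem.Dict String (List String) :=
    (PySem.Dict.empty.insert "files" []).insert "videos" []
  let result := tupleList.foldl (fun r t =>
    if t.1 == "file" then r.modify "files" [] (fun xs => xs ++ [t.2])
    else if t.1 == "video" then r.modify "videos" [] (fun xs => xs ++ [t.2])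
    else r) result
  result.items

-- ===== PORT B =====
-- helper 'go' of Source B: divide and conquer on halves (ts[:mid] / ts[mid:] ported as take/drop)
def pvGo (ts : List (String × String)) : List String × List String :=
  if _h : ts.length ≤ 1 then
    match ts with
    | [] => ([], [])
    | t :: _ =>
      if t.1 == "file" then ([t.2], [])
      else if t.1 == "video" then ([], [t.2])
      else ([], [])
  else
    let mid := ts.length / 2
    let (lf, lv) := pvGo (ts.take mid)
    let (rf, rv) := pvGo (ts.drop mid)
    (lf ++ rf, lv ++ rv)
termination_by ts.length
decreasing_by
  · simp only [List.length_take]; omega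
  · simp only [List.length_drop]; omega

def tuple_list_to_value_alt (tupleList : List (String × String)) : List (String × List String) :=
  let (fs, vs) := pvGo tupleList
  [("files", fs), ("videos", vs)]

-- ===== PRECONDITION & SPEC =====
def Spec_tuple_list_to_value (tupleList : List (String × String)) (out : List (String × List String)) : Prop := out = tuple_list_to_value_alt tupleList
instance (tupleList : List (String × String)) (out : List (String × List String)) : Decidable (Spec_tuple_list_to_value tupleList out) := by unfold Spec_tuple_list_to_value; infer_instance

-- ===== CLAIM (what is proved, stated in full; the proofs are below) =====
def Claim_equal_tuple_list_to_value : Prop := ∀ (tupleList : List (String × String)), Dom_tuple_list_to_value tupleList → Spec_tuple_list_to_value tupleList (tuple_list_to_value tupleList)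

-- ===== LEMMAS AND PROOFS =====

-- invariant of A's loop: starting from the two-key dict with accumulated lists fs, vs,
-- the loop appends exactly the filtered seconds of the remaining list
theorem pv_loop_inv (l : List (String × String)) (fs vs : List String) :
    (l.foldl (fun r t =>
        if t.1 == "file" then r.modify "files" [] (fun xs => xs ++ [t.2])
        else if t.1 == "video" then r.modify "videos" [] (fun xs => xs ++ [t.2])
        else r)
      (PySem.Dict.mk [("files", fs), ("videos", vs)])).items
    = [("files", fs ++ (l.filter (fun t => t.1 == "file")).map (·.2)),
       ("videos", vs ++ (l.filter (fun t => t.1 == "video")).map (·.2))] := by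
  induction l generalizing fs vs with
  | nil => simp
  | cons t rest ih =>
    by_cases hf : t.1 == "file"
    · simp only [List.foldl_cons, hf, if_pos]
      have : (PySem.Dict.mk [("files", fs), ("videos", vs)]).modify "files" [] (fun xs => xs ++ [t.2])
          = PySem.Dict.mk [("files", fs ++ [t.2]), ("videos", vs)] := by
        simp [PySem.Dict.modify, PySem.Dict.contains, PySem.Dict.getD, PySem.Dict.get?,
              PySem.Dict.insert]
      rw [this, ih]
      have ht : t.1 = "file" := by exact eq_of_beq hf
      simp [ht]
    · by_cases hv : t.1 == "video"
      · simp only [List.foldl_cons, hf, hv, if_pos, if_neg, Bool.false_eq_true,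
          not_false_iff]
        have : (PySem.Dict.mk [("files", fs), ("videos", vs)]).modify "videos" [] (fun xs => xs ++ [t.2])
            = PySem.Dict.mk [("files", fs), ("videos", vs ++ [t.2])] := by
          simp [PySem.Dict.modify, PySem.Dict.contains, PySem.Dict.getD, PySem.Dict.get?,
                PySem.Dict.insert]
        rw [this, ih]
        have ht : t.1 = "video" := by exact eq_of_beq hv
        simp [ht]
      · simp only [List.foldl_cons, hf, hv, if_neg, Bool.false_eq_true, not_false_iff]
        rw [ih]
        simp [hf, hv]

-- characterisation of B's divide-and-conquer: it computes the two filtered projections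
theorem pvGo_eq_aux : ∀ (n : Nat) (ts : List (String × String)), ts.length ≤ n →
    pvGo ts = ((ts.filter (fun t => t.1 == "file")).map (·.2),
               (ts.filter (fun t => t.1 == "video")).map (·.2)) := by
  intro n
  induction n with
  | zero =>
    intro ts h
    have hts : ts = [] := List.eq_nil_of_length_eq_zero (Nat.le_zero.mp h)
    subst hts; simp [pvGo]
  | succ n ih =>
    intro ts h
    by_cases h1 : ts.length ≤ 1
    · cases ts with
      | nil => simp [pvGo]
      | cons t rest =>
        have hr : rest = [] := by
          simp only [List.length_cons] at h1
          exact List.eq_nil_of_length_eq_zero (by omega)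
        subst hr
        by_cases hf : t.1 == "file"
        · have ht : t.1 = "file" := eq_of_beq hf
          simp [pvGo, ht]
        · by_cases hv : t.1 == "video"
          · simp [pvGo, hf, hv]
          · simp [pvGo, hf, hv]
    · rw [pvGo, dif_neg h1]
      simp only [ih (ts.take (ts.length / 2)) (by simp only [List.length_take]; omega),
          ih (ts.drop (ts.length / 2)) (by simp only [List.length_drop]; omega)]
      simp [← List.filter_append, ← List.map_append]

theorem pvGo_eq (ts : List (String × String)) :
    pvGo ts = ((ts.filter (fun t => t.1 == "file")).map (·.2),
               (ts.filter (fun t => t.1 == "video")).map (·.2)) :=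
  pvGo_eq_aux ts.length ts le_rfl

-- ===== VERDICT (by name: the statement is the Claim_ definition above) =====
theorem tuple_list_to_value_spec : Claim_equal_tuple_list_to_value := by
  intro l _
  show tuple_list_to_value l = tuple_list_to_value_alt l
  unfold tuple_list_to_value tuple_list_to_value_alt
  have hinit : (PySem.Dict.empty.insert "files" ([] : List String)).insert "videos" []
      = PySem.Dict.mk [("files", []), ("videos", [])] := by decide
  rw [hinit, pv_loop_inv, pvGo_eq]
  simp
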